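-- pv_equiv track=rewrite | github.com/astrapart/TheoryVib_Project | fct.py | create_dofList
-- ===== SOURCE A (Python) =====
-- def create_dofList(nodeList):
--     dofList = []
--     dof = 1
--     for i in range(len(nodeList)):
--         tmp = []
--         for j in range(6):
--             tmp.append(dof)
--             dof += 1
--         dofList.append(tmp)
--     return dofList
-- ===== SOURCE B (Python) =====
-- def create_dofList(nodeList):
--     flat = list(range(1, 6 * len(nodeList) + 1))
--     return [flat[k:k + 6] for k in range(0, len(flat), 6)]
-- ===== Notes on version B (the rewrite author's own statement) =====
-- stated objective: alternative
-- what changed: Replaces the nested loops with a running dof counter by two staged passes: first build the flat list 1..6n of all dof numbers, then slice it into consecutive 6-element chunks.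
import Mathlib
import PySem

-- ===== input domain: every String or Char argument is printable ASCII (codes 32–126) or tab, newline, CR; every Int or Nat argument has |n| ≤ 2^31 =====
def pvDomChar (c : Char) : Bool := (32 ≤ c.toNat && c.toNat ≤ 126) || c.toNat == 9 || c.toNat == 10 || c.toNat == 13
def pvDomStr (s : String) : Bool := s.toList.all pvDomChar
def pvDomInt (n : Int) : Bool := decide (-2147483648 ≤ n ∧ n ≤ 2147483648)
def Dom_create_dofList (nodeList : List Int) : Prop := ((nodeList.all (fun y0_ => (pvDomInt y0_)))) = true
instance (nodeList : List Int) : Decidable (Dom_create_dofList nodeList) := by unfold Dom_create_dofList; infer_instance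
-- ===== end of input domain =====

-- B replaces A's running-counter nested loops by two staged passes: build the flat list 1..6n,
-- then slice it into 6-element chunks; objective: alternative (same cost).

-- ===== PORT A =====
-- Literal port of A: outer loop over range(len(nodeList)) carrying (dofList, dof);
-- inner loop over range(6) carrying (tmp, dof).
def create_dofList (nodeList : List Int) : List (List Int) :=
  let s := (PySem.List.pyRange 0 (nodeList.length : Int) 1).foldl
    (fun (st : List (List Int) × Int) _i =>
      let t := (PySem.List.pyRange 0 6 1).foldl
        (fun (t : List Int × Int) _j => (t.1 ++ [t.2], t.2 + 1)) (([] : List Int), st.2)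
      (st.1 ++ [t.1], t.2)) (([] : List (List Int)), (1 : Int))
  s.1

-- ===== PORT B =====
-- Literal port of B: flat = list(range(1, 6*len(nodeList)+1)); [flat[k:k+6] for k in range(0, len(flat), 6)]
def create_dofList_alt (nodeList : List Int) : List (List Int) :=
  let flat := PySem.List.pyRange 1 (6 * (nodeList.length : Int) + 1) 1
  (PySem.List.pyRange 0 (flat.length : Int) 6).map
    (fun k => PySem.List.slice flat (some k) (some (k + 6)))

-- ===== PRECONDITION & SPEC =====
def Spec_create_dofList (nodeList : List Int) (out : List (List Int)) : Prop := out = create_dofList_alt nodeList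
instance (nodeList : List Int) (out : List (List Int)) : Decidable (Spec_create_dofList nodeList out) := by unfold Spec_create_dofList; infer_instance

-- ===== CLAIM (what is proved, stated in full; the proofs are below) =====
def Claim_equal_create_dofList : Prop := ∀ (nodeList : List Int), Dom_create_dofList nodeList → Spec_create_dofList nodeList (create_dofList nodeList)

-- ===== LEMMAS AND PROOFS =====

-- the inner loop of A produces the 6-element block starting at d and advances dof by 6
theorem inner_block (d : Int) :
    (PySem.List.pyRange 0 6 1).foldl
      (fun (t : List Int × Int) _j => (t.1 ++ [t.2], t.2 + 1)) (([] : List Int), d)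
      = ([d, d+1, d+2, d+3, d+4, d+5], d + 6) := by
  rw [show PySem.List.pyRange 0 6 1 = [0,1,2,3,4,5] from by decide]
  simp [List.foldl]
  ring_nf
  trivial

theorem block_as_range (d : Int) :
    PySem.List.pyRange d (d + 6) 1 = [d, d+1, d+2, d+3, d+4, d+5] := by
  rw [PySem.List.pyRange_one]
  norm_num
  rw [show Int.toNat 6 = 6 from rfl]
  simp [List.range_succ]

-- invariant of A's outer loop, by induction on the trip count n
theorem outer_inv (n : Nat) (acc : List (List Int)) (d : Int) :
    ((PySem.List.pyRange 0 (n : Int) 1).foldl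
      (fun (st : List (List Int) × Int) _i =>
        let t := (PySem.List.pyRange 0 6 1).foldl
          (fun (t : List Int × Int) _j => (t.1 ++ [t.2], t.2 + 1)) (([] : List Int), st.2)
        (st.1 ++ [t.1], t.2)) (acc, d))
      = (acc ++ (List.range n).map (fun k : Nat => PySem.List.pyRange (d + 6 * (k : Int)) (d + 6 * (k : Int) + 6) 1),
         d + 6 * n) := by
  induction n generalizing acc d with
  | zero => simp [PySem.List.pyRange_one_eq_nil]
  | succ m ih =>
      rw [show ((m + 1 : Nat) : Int) = (m : Int) + 1 by push_cast; ring,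
          PySem.List.pyRange_one_succ_right (by positivity), List.foldl_append]
      rw [ih]
      simp only [List.foldl_cons, List.foldl_nil, inner_block]
      simp only [Prod.mk.injEq]
      constructor
      · rw [List.range_succ, List.map_append]
        simp [block_as_range]
      · ring

-- B's k-th slice of the flat list is the k-th 6-dof block
theorem chunk_eq (n k : Nat) (hk : k < n) :
    List.take 6 (List.drop (6 * k) (PySem.List.pyRange 1 (6 * (n : Int) + 1) 1))
      = PySem.List.pyRange (6 * (k : Int) + 1) (6 * (k : Int) + 7) 1 := by
  rw [PySem.List.pyRange_one_append 1 (6 * (k : Int) + 1) (6 * (n : Int) + 1)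
        (by omega) (by omega)]
  rw [List.drop_append_of_le_length (by
        rw [PySem.List.length_pyRange_one]; omega)]
  rw [show List.drop (6 * k) (PySem.List.pyRange 1 (6 * (k : Int) + 1) 1) = [] from by
        apply List.drop_eq_nil_of_le
        rw [PySem.List.length_pyRange_one]; omega]
  rw [List.nil_append]
  rw [PySem.List.pyRange_one_append (6 * (k : Int) + 1) (6 * (k : Int) + 7) (6 * (n : Int) + 1)
        (by omega) (by omega)]
  rw [List.take_append_of_le_length (by rw [PySem.List.length_pyRange_one]; omega)]
  apply List.take_of_length_le
  rw [PySem.List.length_pyRange_one]; omega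

theorem create_dofList_spec : Claim_equal_create_dofList := by
  intro nodeList _
  unfold Spec_create_dofList create_dofList create_dofList_alt
  rw [outer_inv]
  simp only
  rw [PySem.List.length_pyRange_one, show (6 * (nodeList.length : Int) + 1 - 1).toNat
        = 6 * nodeList.length from by omega]
  rw [PySem.List.pyRange_of_pos 0 (6 * nodeList.length : Nat) (by norm_num)]
  have hcnt : (if (0 : Int) < ((6 * nodeList.length : Nat) : Int)
      then (((6 * nodeList.length : Nat) : Int) - 0 + 6 - 1) / 6 |>.toNat else 0)
      = nodeList.length := by
    split_ifs with h <;> omega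
  rw [hcnt, List.map_map]
  apply List.map_congr_left
  intro k hk
  rw [List.mem_range] at hk
  simp only [Function.comp]
  rw [show (0 : Int) + 6 * (k : Int) + 6 = ((6 * k : Nat) : Int) + ((6 : Nat) : Int) from by
        push_cast; ring,
      show (0 : Int) + 6 * (k : Int) = ((6 * k : Nat) : Int) from by omega]
  rw [PySem.List.slice_natCast_add]
  rw [chunk_eq nodeList.length k hk]
  congr 1 <;> push_cast <;> ring
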